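-- pv_equiv track=rewrite | github.com/mhmmdjafarg/SearchEngineApp | fungsi.py | getFirstSentence
-- ===== SOURCE A (Python) =====
-- def getFirstSentence(text):
--     EndSentece = ".!?:;"
--     countChar = 0
--     firstSentence = ""
--     for char in text:
--         firstSentence += char
--         countChar += 1
--         if char in EndSentece:
--             break
--         if countChar > 70 and char == ' ':
--             firstSentence += "...."
--             break
--     return firstSentence
-- ===== SOURCE B (Python) =====
-- def getFirstSentence(text):
--     t = next((i for i, c in enumerate(text) if c in ".!?:;"), -1)
--     s = next((j for j, c in enumerate(text[70:]) if c == ' '), -1)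
--     if t != -1 and (s == -1 or t <= s + 70):
--         return text[:t + 1]
--     if s != -1:
--         return text[:s + 71] + "...."
--     return text
-- ===== Notes on version B (the rewrite author's own statement) =====
-- stated objective: idiomatic
-- what changed: B computes the two breakpoints up front (first terminator index, first space at index >= 70 via str.find) and slices once, instead of A's character-by-character accumulation loop.
import Mathlib
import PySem

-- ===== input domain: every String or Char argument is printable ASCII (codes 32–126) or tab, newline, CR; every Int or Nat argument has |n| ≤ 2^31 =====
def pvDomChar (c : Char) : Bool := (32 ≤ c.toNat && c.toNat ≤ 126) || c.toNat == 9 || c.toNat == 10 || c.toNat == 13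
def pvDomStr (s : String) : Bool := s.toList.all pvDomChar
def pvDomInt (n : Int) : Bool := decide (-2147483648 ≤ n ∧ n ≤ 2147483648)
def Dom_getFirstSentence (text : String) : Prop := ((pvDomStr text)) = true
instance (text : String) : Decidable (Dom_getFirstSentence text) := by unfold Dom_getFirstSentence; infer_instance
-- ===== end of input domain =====

-- B computes the two candidate breakpoints up front (first terminator index, first
-- space at index ≥ 70) and slices once, instead of A's char-by-char accumulation loop.

-- ===== PORT A =====
-- EndSentece = ".!?:;"
def pvEndSentece : List Char := ".!?:;".toList

-- the for-loop of A: state = (remaining chars, countChar, firstSentence)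
def pvLoopA : List Char → Int → List Char → List Char
  | [], _, acc => acc
  | c :: cs, countChar, acc =>
    let acc' := acc ++ [c]
    let count' := countChar + 1
    if pvEndSentece.contains c then acc'
    else if count' > 70 ∧ c = ' ' then acc' ++ "....".toList
    else pvLoopA cs count' acc'

def getFirstSentence (text : String) : String :=
  String.mk (pvLoopA text.toList 0 [])

-- ===== PORT B =====
-- next((i for i,c in enumerate(..) if p(c)), -1) is ported as List.findIdx?, -1 for none;
-- text[70:] (nonnegative literal start) is List.drop 70; text[:k+1] is List.take (k+1).
def getFirstSentence_alt (text : String) : String :=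
  let l := text.toList
  let t : Int := match l.findIdx? (fun c => (".!?:;".toList).contains c) with
    | some i => (i : Int)
    | none => -1
  let s : Int := match (l.drop 70).findIdx? (fun c => c == ' ') with
    | some j => (j : Int)
    | none => -1
  if t ≠ -1 ∧ (s = -1 ∨ t ≤ s + 70) then String.mk (l.take (t.toNat + 1))
  else if s ≠ -1 then String.mk (l.take (s.toNat + 71) ++ "....".toList)
  else text

-- ===== PRECONDITION & SPEC =====
def Spec_getFirstSentence (text : String) (out : String) : Prop := out = getFirstSentence_alt text
instance (text : String) (out : String) : Decidable (Spec_getFirstSentence text out) := by unfold Spec_getFirstSentence; infer_instance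

-- ===== CLAIM (what is proved, stated in full; the proofs are below) =====
def Claim_equal_getFirstSentence : Prop := ∀ (text : String), Dom_getFirstSentence text → Spec_getFirstSentence text (getFirstSentence text)

-- ===== LEMMAS AND PROOFS =====

-- the value appended by A's loop, with k = number of chars already consumed
def gSpec : List Char → Nat → List Char
  | [], _ => []
  | c :: cs, k =>
    if pvEndSentece.contains c then [c]
    else if 70 ≤ k ∧ c = ' ' then c :: "....".toList
    else c :: gSpec cs (k + 1)

-- the same with a countdown m = 70 - k
def gSpecM : List Char → Nat → List Char
  | [], _ => []
  | c :: cs, m =>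
    if pvEndSentece.contains c then [c]
    else if m = 0 ∧ c = ' ' then c :: "....".toList
    else c :: gSpecM cs (m - 1)

-- B's computation, in match form over list indices
def bMatch (cs : List Char) (m : Nat) : List Char :=
  match cs.findIdx? (fun c => pvEndSentece.contains c),
        (cs.drop m).findIdx? (fun c => c == ' ') with
  | some t, some s => if t ≤ s + m then cs.take (t + 1)
                      else cs.take (s + m + 1) ++ "....".toList
  | some t, none => cs.take (t + 1)
  | none, some s => cs.take (s + m + 1) ++ "....".toList
  | none, none => cs

theorem loopA_eq_gSpec (cs : List Char) (n : Nat) (acc : List Char) :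
    pvLoopA cs (n : Int) acc = acc ++ gSpec cs n := by
  induction cs generalizing n acc with
  | nil => simp [pvLoopA, gSpec]
  | cons c cs ih =>
    have hcast : (n : Int) + 1 = ((n + 1 : Nat) : Int) := by push_cast; ring
    have hgt : (((n + 1 : Nat) : Int) > 70) ↔ (70 ≤ n) := by push_cast; omega
    simp only [pvLoopA, gSpec, hcast, hgt, ih]
    split_ifs <;> simp

theorem gSpec_eq_gSpecM (cs : List Char) (k : Nat) :
    gSpec cs k = gSpecM cs (70 - k) := by
  induction cs generalizing k with
  | nil => simp [gSpec, gSpecM]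
  | cons c cs ih =>
    have h1 : (70 ≤ k) ↔ (70 - k = 0) := by omega
    have h2 : 70 - (k + 1) = (70 - k) - 1 := by omega
    simp only [gSpec, gSpecM, ih, h2, h1]

theorem gSpecM_eq_bMatch (cs : List Char) (m : Nat) :
    gSpecM cs m = bMatch cs m := by
  induction cs generalizing m with
  | nil => simp [gSpecM, bMatch]
  | cons c cs ih =>
    by_cases hterm : pvEndSentece.contains c
    · have hmem : c ∈ pvEndSentece := by simpa using hterm
      have hfind : (c :: cs).findIdx? (fun c => pvEndSentece.contains c) = some 0 := by
        rw [List.findIdx?_cons]; simp [hmem]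
      unfold bMatch
      rw [hfind]
      rcases hdrop : ((c :: cs).drop m).findIdx? (fun c => c == ' ') with _ | s
      · simp [gSpecM, hmem]
      · simp [gSpecM, hmem]
    · have hnmem : c ∉ pvEndSentece := by simpa using hterm
      have hfind : (c :: cs).findIdx? (fun c => pvEndSentece.contains c)
          = (cs.findIdx? (fun c => pvEndSentece.contains c)).map (· + 1) := by
        rw [List.findIdx?_cons]; simp [hnmem]
      by_cases hsp : (m = 0 ∧ c = ' ')
      · obtain ⟨hm0, hc⟩ := hsp
        subst hm0; subst hc
        have hsf : ((' ' :: cs).drop 0).findIdx? (fun c => c == ' ') = some 0 := by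
          rw [List.drop_zero, List.findIdx?_cons]; simp
        unfold bMatch
        rw [hfind, hsf]
        rcases h : cs.findIdx? (fun c => pvEndSentece.contains c) with _ | t
        · simp [gSpecM, hnmem]
        · simp [gSpecM, hnmem]
      · have hstep : gSpecM (c :: cs) m = c :: gSpecM cs (m - 1) := by
          simp [gSpecM, hnmem, hsp]
        rw [hstep, ih]
        cases m with
        | zero =>
          have hc : ¬ ((c == ' ') = true) := fun h => hsp ⟨rfl, by simpa using h⟩
          have hsf : ((c :: cs).drop 0).findIdx? (fun c => c == ' ')
              = (cs.findIdx? (fun c => c == ' ')).map (· + 1) := by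
            rw [List.drop_zero, List.findIdx?_cons]; simp [hc]
          unfold bMatch
          rw [hfind, hsf, List.drop_zero]
          rcases h1 : cs.findIdx? (fun c => pvEndSentece.contains c) with _ | t <;>
          rcases h2 : cs.findIdx? (fun c => c == ' ') with _ | s <;>
            simp only [Option.map_none, Option.map_some, Nat.zero_sub]
          · simp [List.take_succ_cons]
          · simp [List.take_succ_cons]
          · by_cases hts : t ≤ s + 0
            · rw [if_pos hts, if_pos (by omega : t + 1 ≤ s + 1 + 0), List.take_succ_cons]
            · rw [if_neg hts, if_neg (by omega : ¬ (t + 1 ≤ s + 1 + 0)),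
                show s + 1 + 0 + 1 = (s + 0 + 1) + 1 from by omega, List.take_succ_cons,
                show s + 0 + 1 = s + 1 from by omega]
              rfl
        | succ m' =>
          have hdrop : (c :: cs).drop (m' + 1) = cs.drop m' := by simp
          have hm1 : m' + 1 - 1 = m' := by omega
          rw [hm1]
          unfold bMatch
          rw [hfind, hdrop]
          rcases h1 : cs.findIdx? (fun c => pvEndSentece.contains c) with _ | t <;>
          rcases h2 : (cs.drop m').findIdx? (fun c => c == ' ') with _ | s <;>
            simp only [Option.map_none, Option.map_some]
          · rw [show s + (m' + 1) + 1 = (s + m' + 1) + 1 by omega, List.take_succ_cons]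
            simp
          · simp [List.take_succ_cons]
          · by_cases hts : t ≤ s + m'
            · rw [if_pos hts, if_pos (by omega : t + 1 ≤ s + (m' + 1)), List.take_succ_cons]
            · rw [if_neg hts, if_neg (by omega : ¬ (t + 1 ≤ s + (m' + 1))),
                show s + (m' + 1) + 1 = (s + m' + 1) + 1 from by omega, List.take_succ_cons]
              rfl

theorem bMatch_70_eq_alt (text : String) :
    String.mk (bMatch text.toList 70) = getFirstSentence_alt text := by
  have hpv : (fun c => (".!?:;".toList).contains c) = (fun c => pvEndSentece.contains c) := rfl
  unfold getFirstSentence_alt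
  rw [hpv]
  unfold bMatch
  rcases h1 : text.toList.findIdx? (fun c => pvEndSentece.contains c) with _ | t <;>
    rcases h2 : (text.toList.drop 70).findIdx? (fun c => c == ' ') with _ | s <;>
      simp only [h1, h2]
  · rw [if_neg (fun h => h.1 rfl : ¬((-1 : Int) ≠ -1 ∧ (True ∨ (-1 : Int) ≤ -1 + 70))),
      if_neg (by omega : ¬((-1 : Int) ≠ -1))]
    exact String.ofList_toList
  · rw [if_neg (by omega : ¬((-1 : Int) ≠ -1 ∧ ((s : Int) = -1 ∨ (-1 : Int) ≤ (s : Int) + 70))),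
      if_pos (by omega : ((s : Nat) : Int) ≠ -1),
      Int.toNat_natCast, show s + 70 + 1 = s + 71 from by omega]
  · rw [if_pos (⟨by omega, Or.inl trivial⟩ : ((t : Nat) : Int) ≠ -1 ∧ (True ∨ (t : Int) ≤ -1 + 70)),
      Int.toNat_natCast]
  · by_cases hts : t ≤ s + 70
    · rw [if_pos hts,
        if_pos (by omega : ((t : Nat) : Int) ≠ -1 ∧ ((s : Int) = -1 ∨ (t : Int) ≤ (s : Int) + 70)),
        Int.toNat_natCast]
    · rw [if_neg hts,
        if_neg (by omega : ¬(((t : Nat) : Int) ≠ -1 ∧ ((s : Int) = -1 ∨ (t : Int) ≤ (s : Int) + 70))),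
        if_pos (by omega : ((s : Nat) : Int) ≠ -1),
        Int.toNat_natCast, show s + 70 + 1 = s + 71 from by omega]

-- ===== VERDICT (by name: the statement is the Claim_ definition above) =====
theorem getFirstSentence_spec : Claim_equal_getFirstSentence := by
  intro text _
  unfold Spec_getFirstSentence getFirstSentence
  have h0 : (0 : Int) = ((0 : Nat) : Int) := rfl
  rw [h0, loopA_eq_gSpec, gSpec_eq_gSpecM, gSpecM_eq_bMatch]
  simpa using bMatch_70_eq_alt text
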